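-- pv_equiv track=rewrite | github.com/lamhongphuc2004/CO-SO-LAP-TRINH.PYTHON | CO-SO-LAP-TRINH.PYTHON/62.C5.py | csc
-- ===== SOURCE A (Python) =====
-- def csc(L):
--     if len(L)<2:
--         return None
--     else:
--         congsai=L[1]-L[0]
--         for i in range(2,len(L)):
--             if L[i]-L[i-1] != congsai:
--                 return None
--         return congsai
-- ===== SOURCE B (Python) =====
-- def csc(L):
--     if len(L) < 2:
--         return None
--     diffs = {L[i] - L[i - 1] for i in range(1, len(L))}
--     if len(diffs) == 1:
--         return diffs.pop()
--     return None
-- ===== Notes on version B (the rewrite author's own statement) =====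
-- stated objective: simpler
-- what changed: Replaces the early-exit index scan against a stored first difference by building the set of all consecutive differences and returning its sole element when the set is a singleton.
import Mathlib
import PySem

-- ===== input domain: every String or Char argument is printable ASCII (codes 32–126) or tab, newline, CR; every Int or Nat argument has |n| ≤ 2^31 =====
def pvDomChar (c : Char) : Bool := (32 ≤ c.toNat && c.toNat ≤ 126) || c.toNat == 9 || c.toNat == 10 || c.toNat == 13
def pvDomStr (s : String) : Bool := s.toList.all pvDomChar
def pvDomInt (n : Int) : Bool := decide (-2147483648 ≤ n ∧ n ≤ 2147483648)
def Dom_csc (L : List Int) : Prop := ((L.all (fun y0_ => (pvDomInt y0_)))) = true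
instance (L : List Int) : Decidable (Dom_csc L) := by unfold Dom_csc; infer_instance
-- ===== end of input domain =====

-- B builds the set of all consecutive differences and checks it is a singleton (simpler
-- decomposition); A scans with an early exit against the stored first difference.

-- ===== PORT A =====
-- the 'for i in range(2,len(L))' loop with early return, as recursion over the remaining
-- elements carrying the previous element (L[i-1]) as state
def scanLoopA (congsai prev : Int) : List Int → Option Int
  | [] => some congsai
  | x :: rest => if x - prev ≠ congsai then none else scanLoopA congsai x rest

def csc (L : List Int) : Option Int :=
  match L with
  | a :: b :: rest => scanLoopA (b - a) b rest
  | _ => none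

-- ===== PORT B =====
-- the comprehension [L[i]-L[i-1] for i in range(1,len(L))], as recursion over consecutive pairs
def pairDiffsB (prev : Int) : List Int → List Int
  | [] => []
  | x :: rest => (x - prev) :: pairDiffsB x rest

def csc_alt (L : List Int) : Option Int :=
  if L.length < 2 then none
  else
    let diffs : PySem.Set Int :=
      PySem.Set.ofList (match L with | [] => [] | a :: rest => pairDiffsB a rest)
    if diffs.length = 1 then diffs.head? else none

-- ===== PRECONDITION & SPEC =====
def Spec_csc (L : List Int) (out : Option Int) : Prop := out = csc_alt L
instance (L : List Int) (out : Option Int) : Decidable (Spec_csc L out) := by unfold Spec_csc; infer_instance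

-- ===== CLAIM (what is proved, stated in full; the proofs are below) =====
def Claim_equal_csc : Prop := ∀ (L : List Int), Dom_csc L → Spec_csc L (csc L)

-- ===== LEMMAS AND PROOFS =====

lemma scanLoopA_eq_all (c prev : Int) (rest : List Int) :
    scanLoopA c prev rest = if (pairDiffsB prev rest).all (fun d => d == c) then some c else none := by
  induction rest generalizing prev with
  | nil => simp [scanLoopA, pairDiffsB]
  | cons x rest ih =>
      by_cases h : x - prev = c
      · simp [scanLoopA, pairDiffsB, h, ih]
      · simp [scanLoopA, pairDiffsB, h]

lemma foldl_add_of_mem (s : PySem.Set Int) (ds : List Int)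
    (h : ∀ d ∈ ds, PySem.Set.contains s d = true) : ds.foldl PySem.Set.add s = s := by
  induction ds with
  | nil => rfl
  | cons d ds ih =>
      have hc : PySem.Set.contains s d = true := h d List.mem_cons_self
      have hd : PySem.Set.add s d = s := by
        simp [PySem.Set.add]
        simpa using hc
      rw [List.foldl_cons, hd]
      exact ih (fun d' hd' => h d' (by simp [hd']))

lemma ofList_cons_all (c : Int) (ds : List Int) (h : ∀ d ∈ ds, d = c) :
    PySem.Set.ofList (c :: ds) = [c] := by
  have h1 : PySem.Set.ofList (c :: ds) = ds.foldl PySem.Set.add [c] := by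
    simp [PySem.Set.ofList_eq_foldl, PySem.Set.add, PySem.Set.contains]
  rw [h1]
  exact foldl_add_of_mem [c] ds (fun d hd => by simp [PySem.Set.contains, h d hd])

lemma length_ne_one_of_two_mem (s : List Int) (x y : Int) (hx : x ∈ s) (hy : y ∈ s)
    (hxy : x ≠ y) : s.length ≠ 1 := by
  match s with
  | [] => simp at hx
  | [z] =>
      simp at hx hy
      exact absurd (hx.trans hy.symm) hxy
  | a :: b :: t => simp

-- ===== VERDICT (by name: the statement is the Claim_ definition above) =====
theorem csc_spec : Claim_equal_csc := by
  intro L _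
  unfold Spec_csc
  match L with
  | [] => rfl
  | [_] => rfl
  | a :: b :: rest =>
      show scanLoopA (b - a) b rest = csc_alt (a :: b :: rest)
      rw [scanLoopA_eq_all]
      have hlen : ¬ (a :: b :: rest).length < 2 := by simp
      simp only [csc_alt, hlen, if_false, pairDiffsB]
      by_cases h : ∀ d ∈ pairDiffsB b rest, d = b - a
      · have hall : (pairDiffsB b rest).all (fun d => d == (b - a)) = true := by
          simp only [List.all_eq_true, beq_iff_eq]; exact h
        rw [hall, ofList_cons_all (b - a) (pairDiffsB b rest) h]
        simp
      · rw [not_forall] at h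
        simp only [not_forall, exists_prop] at h
        obtain ⟨d, hd, hne⟩ := h
        have hall : (pairDiffsB b rest).all (fun d => d == (b - a)) = false := by
          simp only [List.all_eq_false]
          exact ⟨d, hd, by simp [hne]⟩
        rw [hall]
        have hdm : d ∈ PySem.Set.ofList ((b - a) :: pairDiffsB b rest) := by
          rw [PySem.Set.mem_ofList]; exact List.mem_cons_of_mem _ hd
        have hcm : (b - a) ∈ PySem.Set.ofList ((b - a) :: pairDiffsB b rest) := by
          rw [PySem.Set.mem_ofList]; exact List.mem_cons_self
        have := length_ne_one_of_two_mem _ _ _ hdm hcm hne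
        simp [this]
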